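-- pv_equiv track=rewrite | github.com/denizbt/pan-styleAnalysis25 | utils.py | combine_paragraphs
-- ===== SOURCE A (Python) =====
-- def combine_paragraphs(probs, labels):
--   """
--   Args:
--     probs: list[list[str]]
--     labels: list[int], either {0, 1} representing style changes
--     len(labels)+1 == len(probs)
--
--   Returns:
--     list[str] where each str is single author paragraph. each separate element is different author
--   """
--   paras = []
--   for p in probs:
--     comb = []
--     curr_para = p[0]
--     for i in range(len(p)-1):
--       if labels[i] == 1:
--         comb.append(curr_para)
--         curr_para = ""
--
--       curr_para += p[i+1]
--
--     if curr_para != "":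
--       comb.append(curr_para)
--
--     paras += comb
--
--   return paras
-- ===== SOURCE B (Python) =====
-- def combine_paragraphs(probs, labels):
--   """Precompute the cut indices for each group, partition the group at those
--   boundaries and join each slice; a trailing empty segment is discarded."""
--   paras = []
--   for p in probs:
--     cuts = [i + 1 for i in range(len(p) - 1) if labels[i] == 1]
--     segs = []
--     prev = 0
--     for c in cuts + [len(p)]:
--       segs.append("".join(p[prev:c]))
--       prev = c
--     if segs[-1] == "":
--       segs.pop()
--     paras.extend(segs)
--   return paras
-- ===== Notes on version B (the rewrite author's own statement) =====
-- stated objective: alternative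
-- what changed: Replaces A's single accumulate-with-+= pass (running current-paragraph string with conditional flushes) by a precompute-boundaries-then-partition decomposition: collect the cut indices where labels are 1, slice each group at those boundaries and join each slice, dropping a trailing empty segment; Pre_ excludes only inputs where A raises IndexError (an empty group, or a group longer than len(labels)+1).
import Mathlib
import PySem

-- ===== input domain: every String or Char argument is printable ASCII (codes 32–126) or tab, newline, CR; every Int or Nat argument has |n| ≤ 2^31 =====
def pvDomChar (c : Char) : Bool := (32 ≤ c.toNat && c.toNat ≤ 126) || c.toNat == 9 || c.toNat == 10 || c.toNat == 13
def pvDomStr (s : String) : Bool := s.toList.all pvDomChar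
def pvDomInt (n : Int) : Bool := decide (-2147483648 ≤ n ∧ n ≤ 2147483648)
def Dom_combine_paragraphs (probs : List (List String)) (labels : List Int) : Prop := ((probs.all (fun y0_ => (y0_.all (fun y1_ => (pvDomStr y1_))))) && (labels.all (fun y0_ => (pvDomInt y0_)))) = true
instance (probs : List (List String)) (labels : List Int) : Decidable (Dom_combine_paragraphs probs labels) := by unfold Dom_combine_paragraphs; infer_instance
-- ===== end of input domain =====

-- B changes the decomposition (precompute cut indices, then slice-and-join each group)
-- rather than A's accumulate-with-+= single pass; same cost, proved equal on Pre_.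

-- ===== PORT A =====
-- A's per-group loop body (the body of 'for p in probs'), as a named helper.
def combineGroupA (labels : List Int) (p : List String) : List String :=
  let curr0 := PySem.List.pyGetD p 0 ""          -- curr_para = p[0]  (IndexError for p = [] excluded by Pre_)
  let st := (PySem.List.pyRange 0 ((p.length : Int) - 1) 1).foldl
    (fun (st : List String × String) i =>
      let st' := if PySem.List.pyGetD labels i 0 = 1 then (st.1 ++ [st.2], "") else st
      (st'.1, st'.2 ++ PySem.List.pyGetD p (i + 1) ""))
    ([], curr0)
  if st.2 ≠ "" then st.1 ++ [st.2] else st.1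

def combine_paragraphs (probs : List (List String)) (labels : List Int) : List String :=
  probs.foldl (fun paras p => paras ++ combineGroupA labels p) []

-- ===== PORT B =====
-- B's per-group body: cut indices, then partition at the boundaries.
def combineGroupB (labels : List Int) (p : List String) : List String :=
  let cuts := ((PySem.List.pyRange 0 ((p.length : Int) - 1) 1).filter
      (fun i => PySem.List.pyGetD labels i 0 == 1)).map (· + 1)
  let st := (cuts ++ [(p.length : Int)]).foldl
    (fun (st : List String × Int) c =>
      (st.1 ++ [PySem.Str.join "" (PySem.List.slice p (some st.2) (some c))], c))
    ([], 0)
  if PySem.List.pyGetD st.1 (-1) "" = "" then st.1.dropLast else st.1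

def combine_paragraphs_alt (probs : List (List String)) (labels : List Int) : List String :=
  probs.foldl (fun paras p => paras ++ combineGroupB labels p) []

-- ===== PRECONDITION & SPEC =====
-- Pre_ excludes exactly the inputs where A raises IndexError: an empty group
-- (p[0]), or a group longer than len(labels)+1 (labels[i] out of range).
def Pre_combine_paragraphs (probs : List (List String)) (labels : List Int) : Prop :=
  ∀ p ∈ probs, p ≠ [] ∧ p.length ≤ labels.length + 1
instance (probs : List (List String)) (labels : List Int) : Decidable (Pre_combine_paragraphs probs labels) := by unfold Pre_combine_paragraphs; infer_instance

def pvWitness_combine_paragraphs : List (List String) × List Int := ([["a", "b"], ["c"]], [1])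

def Spec_combine_paragraphs (probs : List (List String)) (labels : List Int) (out : List String) : Prop := out = combine_paragraphs_alt probs labels
instance (probs : List (List String)) (labels : List Int) (out : List String) : Decidable (Spec_combine_paragraphs probs labels out) := by unfold Spec_combine_paragraphs; infer_instance

-- ===== CLAIM (what is proved, stated in full; the proofs are below) =====
def Claim_equal_combine_paragraphs : Prop := ∀ (probs : List (List String)) (labels : List Int), Dom_combine_paragraphs probs labels → Pre_combine_paragraphs probs labels → Spec_combine_paragraphs probs labels (combine_paragraphs probs labels)


-- ===== LEMMAS AND PROOFS =====

-- Common specification: walk the (label, next-string) pairs, starting a new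
-- segment at each label 1; 'dropTE' drops a trailing empty segment.
def segsOf (curr : String) : List (Int × String) → List String
  | [] => [curr]
  | (l, x) :: rest => if l = 1 then curr :: segsOf x rest else segsOf (curr ++ x) rest

def dropTE (ss : List String) : List String :=
  if ss.getLast? = some "" then ss.dropLast else ss

theorem segsOf_ne_nil (curr : String) (pairs : List (Int × String)) : segsOf curr pairs ≠ [] := by
  induction pairs generalizing curr with
  | nil => simp [segsOf]
  | cons pr rest ih => obtain ⟨l, x⟩ := pr; simp only [segsOf]; split_ifs <;> simp [ih]

theorem dropTE_cons (a : String) (s : List String) (hs : s ≠ []) :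
    dropTE (a :: s) = a :: dropTE s := by
  obtain ⟨b, s', rfl⟩ : ∃ b s', s = b :: s' := by
    cases s with | nil => exact absurd rfl hs | cons b s' => exact ⟨b, s', rfl⟩
  unfold dropTE
  rw [List.getLast?_cons_cons, List.dropLast_cons₂]
  split_ifs <;> rfl

-- join "" basics
theorem joinE_nil : PySem.Str.join "" ([] : List String) = "" := by decide

theorem joinE_cons (x : String) (xs : List String) :
    PySem.Str.join "" (x :: xs) = x ++ PySem.Str.join "" xs := by
  apply String.toList_inj.mp
  cases xs with
  | nil => simp [PySem.Str.toList_join, PySem.Chars.join_singleton, PySem.Chars.join_nil]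
  | cons y ys => simp [PySem.Str.toList_join, PySem.Chars.join_cons_cons]

-- ---------- A side ----------

-- the zip-level step of A's loop
def stepZ (st : List String × String) (pr : Int × String) : List String × String :=
  let st' := if pr.1 = 1 then (st.1 ++ [st.2], "") else st
  (st'.1, st'.2 ++ pr.2)

theorem foldZ (pairs : List (Int × String)) :
    ∀ (comb : List String) (curr : String),
      (let st := pairs.foldl stepZ (comb, curr)
       if st.2 ≠ "" then st.1 ++ [st.2] else st.1) = comb ++ dropTE (segsOf curr pairs) := by
  induction pairs with
  | nil =>
    intro comb curr
    simp only [List.foldl_nil, segsOf, dropTE]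
    by_cases hc : curr = "" <;> simp [hc]
  | cons pr rest ih =>
    obtain ⟨l, x⟩ := pr
    intro comb curr
    simp only [List.foldl_cons, stepZ, segsOf]
    by_cases hl : l = 1
    · simp only [hl, reduceIte]
      rw [String.empty_append, ih (comb ++ [curr]) x,
          dropTE_cons curr _ (segsOf_ne_nil x rest), List.append_assoc]
      rfl
    · simp only [if_neg hl]
      exact ih comb (curr ++ x)

-- index loop → zip loop
theorem foldIdx (labels : List Int) (p : List String) (t : List String) :
    ∀ (j : Nat) (st : List String × String),
      p.drop (j + 1) = t → j + t.length ≤ labels.length →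
      ((List.range t.length).map (fun k => ((j + k : Nat) : Int))).foldl
          (fun (st : List String × String) i =>
            let st' := if PySem.List.pyGetD labels i 0 = 1 then (st.1 ++ [st.2], "") else st
            (st'.1, st'.2 ++ PySem.List.pyGetD p (i + 1) ""))
          st
        = ((labels.drop j).zip t).foldl stepZ st := by
  induction t generalizing p with
  | nil => intro j st _ _; simp
  | cons x xs ih =>
    intro j st hdrop hlen
    have hj : j < labels.length := by simp at hlen; omega
    have hx : p.getD (j + 1) "" = x := by
      rw [List.getD_eq_getElem?_getD, ← List.head?_drop, hdrop]; rfl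
    have hdl : labels.drop j = labels[j] :: labels.drop (j + 1) :=
      List.drop_eq_getElem_cons hj
    rw [List.length_cons, List.range_succ_eq_map, List.map_cons, List.map_map,
        List.foldl_cons, hdl, List.zip_cons_cons, List.foldl_cons]
    have hstep :
        (let st' := if PySem.List.pyGetD labels ((j + 0 : Nat) : Int) 0 = 1
                    then (st.1 ++ [st.2], "") else st
         (st'.1, st'.2 ++ PySem.List.pyGetD p (((j + 0 : Nat) : Int) + 1) "")) =
        stepZ st (labels[j], x) := by
      have h1 : PySem.List.pyGetD labels ((j + 0 : Nat) : Int) 0 = labels[j] := by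
        simp [PySem.List.pyGetD_natCast, List.getElem?_eq_getElem hj]
      have h2 : (((j + 0 : Nat) : Int) + 1) = ((j + 1 : Nat) : Int) := by push_cast; ring
      have h3 : PySem.List.pyGetD p (((j + 0 : Nat) : Int) + 1) "" = x := by
        rw [h2, PySem.List.pyGetD_natCast, hx]
      rw [stepZ]; rw [h1, h3]
    have hmaps : (List.range xs.length).map ((fun k => ((j + k : Nat) : Int)) ∘ Nat.succ)
        = (List.range xs.length).map (fun k => (((j + 1) + k : Nat) : Int)) := by
      apply List.map_congr_left
      intro k _
      have hk : j + (k + 1) = j + 1 + k := by omega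
      simp only [Function.comp_apply]
      omega
    rw [hstep, hmaps]
    have hdrop' : p.drop (j + 1 + 1) = xs := by
      have h' := congrArg (List.drop 1) hdrop
      rw [List.drop_drop] at h'
      simpa [show 1 + (j + 1) = j + 1 + 1 by omega] using h'
    exact ih p (j + 1) _ hdrop' (by simp only [List.length_cons] at hlen; omega)

theorem groupA_eq (labels : List Int) (h : String) (t : List String)
    (hlen : t.length ≤ labels.length) :
    combineGroupA labels (h :: t) = dropTE (segsOf h (labels.zip t)) := by
  simp only [combineGroupA]
  have hlen1 : (((h :: t).length : Int) - 1) = (t.length : Int) := by simp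
  have hrange : PySem.List.pyRange 0 ((t.length : Nat) : Int) 1
      = (List.range t.length).map (fun k => ((0 + k : Nat) : Int)) := by
    rw [PySem.List.pyRange_one]
    simp
  rw [hlen1, hrange]
  have h0 : PySem.List.pyGetD (h :: t) 0 "" = h := PySem.List.pyGetD_zero_cons h t ""
  rw [h0, foldIdx labels (h :: t) t 0 ([], h) (by simp) (by omega), List.drop_zero]
  have := foldZ (labels.zip t) [] h
  simpa using this

-- ---------- B side ----------

-- relative cut positions of a pair list
def cutsP : List (Int × String) → List Nat
  | [] => []
  | (l, _) :: rest => if l = 1 then 1 :: (cutsP rest).map (· + 1) else (cutsP rest).map (· + 1)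

theorem cutsP_pos (pairs : List (Int × String)) : ∀ c ∈ cutsP pairs, 1 ≤ c := by
  induction pairs with
  | nil => simp [cutsP]
  | cons pr rest ih =>
    obtain ⟨l, x⟩ := pr
    simp only [cutsP]; split_ifs <;> intro c hc <;> simp at hc <;> omega

-- the segment list B builds from a bound list (Nat bounds)
def segB (p : List String) : Nat → List Nat → List String
  | _, [] => []
  | prev, c :: cs => PySem.Str.join "" (PySem.List.slice p (some (prev : Int)) (some (c : Int))) :: segB p c cs

-- B's comprehension over range = cutsP of the zip
theorem cutsIdx (labels : List Int) (t : List String) :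
    ∀ (j : Nat), j + t.length ≤ labels.length →
      ((((List.range t.length).map (fun k => ((j + k : Nat) : Int))).filter
          (fun i => PySem.List.pyGetD labels i 0 == 1)).map (· + 1))
        = (cutsP ((labels.drop j).zip t)).map (fun c => ((j + c : Nat) : Int)) := by
  induction t with
  | nil => intro j _; simp [cutsP]
  | cons x xs ih =>
    intro j hlen
    have hj : j < labels.length := by simp at hlen; omega
    have hdl : labels.drop j = labels[j] :: labels.drop (j + 1) :=
      List.drop_eq_getElem_cons hj
    rw [List.length_cons, List.range_succ_eq_map, List.map_cons, List.map_map, hdl,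
        List.zip_cons_cons]
    have hmaps : (List.range xs.length).map ((fun k => ((j + k : Nat) : Int)) ∘ Nat.succ)
        = (List.range xs.length).map (fun k => (((j + 1) + k : Nat) : Int)) := by
      apply List.map_congr_left
      intro k _
      have hk : j + (k + 1) = j + 1 + k := by omega
      simp only [Function.comp_apply]
      omega
    rw [hmaps, List.filter_cons]
    have hcond : (PySem.List.pyGetD labels ((j + 0 : Nat) : Int) 0 == 1) = decide (labels[j] = 1) := by
      have h1 : PySem.List.pyGetD labels ((j + 0 : Nat) : Int) 0 = labels[j] := by
        simp [PySem.List.pyGetD_natCast, List.getElem?_eq_getElem hj]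
      rw [h1]; rfl
    rw [hcond]
    by_cases hl : labels[j] = 1
    · rw [if_pos (by simp [hl])]
      simp only [List.map_cons, cutsP, reduceIte, hl]
      rw [ih (j + 1) (by simp only [List.length_cons] at hlen; omega)]
      simp only [List.map_map]
      refine List.cons_eq_cons.mpr ⟨by push_cast; ring, ?_⟩
      apply List.map_congr_left; intro c _
      simp only [Function.comp]
      congr 1; omega
    · rw [if_neg (by simp [hl])]
      simp only [cutsP]
      rw [if_neg hl, ih (j + 1) (by simp only [List.length_cons] at hlen; omega)]
      simp only [List.map_map]
      apply List.map_congr_left; intro c _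
      simp only [Function.comp]
      congr 1; omega

-- B's prev/append fold = segB
theorem segsFoldEq (p : List String) (ns : List Nat) :
    ∀ (prev : Nat) (prev0 : Int) (acc : List String), prev0 = (prev : Int) →
      ((ns.map (fun (c : Nat) => (c : Int))).foldl
          (fun (st : List String × Int) c =>
            (st.1 ++ [PySem.Str.join "" (PySem.List.slice p (some st.2) (some c))], c))
          (acc, prev0)).1
        = acc ++ segB p prev ns := by
  induction ns with
  | nil => intro prev prev0 acc _; simp [segB]
  | cons c cs ih =>
    intro prev prev0 acc hprev
    simp only [List.map_cons, List.foldl_cons, segB, hprev]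
    rw [ih c ((c : Nat) : Int) _ rfl]
    simp

theorem segB_shift (q : List String) (y : String) (cs : List Nat) :
    ∀ (prev : Nat), segB (y :: q) (prev + 1) (cs.map (· + 1)) = segB q prev cs := by
  induction cs generalizing q with
  | nil => intro prev; simp [segB]
  | cons c cs ih =>
    intro prev
    simp only [List.map_cons, segB]
    have hs : PySem.List.slice (y :: q) (some ((prev + 1 : Nat) : Int)) (some ((c + 1 : Nat) : Int))
        = PySem.List.slice q (some (prev : Nat)) (some (c : Nat)) := by
      rw [PySem.List.slice_natCast, PySem.List.slice_natCast]
      simp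
    rw [hs, ih]

theorem segB_tail_eq (q : List String) (z z' : String) (cs : List Nat) :
    ∀ (prev : Nat), 1 ≤ prev → (∀ c ∈ cs, 1 ≤ c) → segB (z :: q) prev cs = segB (z' :: q) prev cs := by
  induction cs with
  | nil => intro prev _ _; rfl
  | cons c cs ih =>
    intro prev hprev hcs
    simp only [segB]
    have hd : (z :: q).drop prev = (z' :: q).drop prev := by
      cases prev with
      | zero => omega
      | succ m => simp
    have hs : PySem.List.slice (z :: q) (some ((prev : Nat) : Int)) (some ((c : Nat) : Int))
        = PySem.List.slice (z' :: q) (some (prev : Nat)) (some (c : Nat)) := by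
      rw [PySem.List.slice_natCast, PySem.List.slice_natCast, hd]
    rw [hs, ih c (hcs c (by simp)) (fun d hd' => hcs d (by simp [hd']))]

-- a whole-group slice is the whole group
theorem slice_full (p : List String) : PySem.List.slice p (some ((0 : Nat) : Int)) (some ((p.length : Nat) : Int)) = p := by
  rw [PySem.List.slice_natCast]; simp

theorem joinE_cons_cons (h x : String) (q : List String) :
    PySem.Str.join "" (h :: x :: q) = PySem.Str.join "" ((h ++ x) :: q) := by
  rw [joinE_cons, joinE_cons, joinE_cons, String.append_assoc]

theorem segB_absorb (q : List String) (h x : String) (cs : List Nat)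
    (hcs : ∀ c ∈ cs, 1 ≤ c) :
    segB (h :: x :: q) 0 (cs.map (· + 1) ++ [q.length + 2])
      = segB ((h ++ x) :: q) 0 (cs ++ [q.length + 1]) := by
  cases cs with
  | nil =>
    simp only [List.map_nil, List.nil_append, segB]
    have h1 : (q.length + 2) = (h :: x :: q).length := by simp
    have h2 : (q.length + 1) = ((h ++ x) :: q).length := by simp
    rw [h1, h2, slice_full, slice_full, joinE_cons_cons]
  | cons c cs' =>
    have hc1 : 1 ≤ c := hcs c (by simp)
    obtain ⟨k, rfl⟩ : ∃ k, c = k + 1 := ⟨c - 1, by omega⟩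
    simp only [List.map_cons, List.cons_append, segB]
    refine List.cons_eq_cons.mpr ⟨?_, ?_⟩
    · -- heads: join of the two initial slices agree
      have hsl1 : PySem.List.slice (h :: x :: q) (some ((0 : Nat) : Int)) (some ((k + 1 + 1 : Nat) : Int))
          = h :: x :: q.take k := by
        rw [PySem.List.slice_natCast]; simp
      have hsl2 : PySem.List.slice ((h ++ x) :: q) (some ((0 : Nat) : Int)) (some ((k + 1 : Nat) : Int))
          = (h ++ x) :: q.take k := by
        rw [PySem.List.slice_natCast]; simp
      rw [hsl1, hsl2, joinE_cons_cons]
    · -- tails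
      have e1 : cs'.map (· + 1) ++ [q.length + 2] = (cs' ++ [q.length + 1]).map (· + 1) := by
        simp
      rw [e1, segB_shift (x :: q) h (cs' ++ [q.length + 1]) (k + 1)]
      exact segB_tail_eq q x (h ++ x) (cs' ++ [q.length + 1]) (k + 1) (by omega)
        (fun d hd => by
          rcases List.mem_append.mp hd with hd | hd
          · exact hcs d (List.mem_cons_of_mem _ hd)
          · simp at hd; omega)

theorem segB_eq_segsOf (pairs : List (Int × String)) :
    ∀ (h : String),
      segB (h :: pairs.map Prod.snd) 0 (cutsP pairs ++ [pairs.length + 1]) = segsOf h pairs := by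
  induction pairs with
  | nil =>
    intro h
    simp only [List.map_nil, cutsP, List.nil_append, List.length_nil, segsOf, segB]
    rw [PySem.List.slice_natCast]
    simp [joinE_cons, joinE_nil, String.append_empty]
  | cons pr rest ih =>
    obtain ⟨l, x⟩ := pr
    intro h
    simp only [List.map_cons, List.length_cons, cutsP, segsOf]
    by_cases hl : l = 1
    · simp only [hl, reduceIte]
      simp only [List.cons_append, segB]
      refine List.cons_eq_cons.mpr ⟨?_, ?_⟩
      · have hsl : PySem.List.slice (h :: x :: rest.map Prod.snd) (some ((0 : Nat) : Int)) (some ((1 : Nat) : Int))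
            = [h] := by
          rw [PySem.List.slice_natCast]; simp
        rw [hsl, joinE_cons, joinE_nil, String.append_empty]
      · have e1 : (cutsP rest).map (· + 1) ++ [rest.length + 1 + 1]
            = ((cutsP rest) ++ [rest.length + 1]).map (· + 1) := by simp
        rw [e1, show (1 : Nat) = 0 + 1 by rfl, segB_shift (x :: rest.map Prod.snd) h _ 0]
        exact ih x
    · simp only [if_neg hl]
      have e2 : rest.length + 1 + 1 = (rest.map Prod.snd).length + 2 := by simp
      rw [e2, segB_absorb (rest.map Prod.snd) h x (cutsP rest) (cutsP_pos rest)]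
      have e3 : (rest.map Prod.snd).length + 1 = rest.length + 1 := by simp
      rw [e3]
      exact ih (h ++ x)

theorem groupB_eq (labels : List Int) (h : String) (t : List String)
    (hlen : t.length ≤ labels.length) :
    combineGroupB labels (h :: t) = dropTE (segsOf h (labels.zip t)) := by
  simp only [combineGroupB]
  have hlen1 : (((h :: t).length : Int) - 1) = (t.length : Int) := by simp
  have hrange : PySem.List.pyRange 0 ((t.length : Nat) : Int) 1
      = (List.range t.length).map (fun k => ((0 + k : Nat) : Int)) := by
    rw [PySem.List.pyRange_one]; simp
  rw [hlen1, hrange, cutsIdx labels t 0 (by omega), List.drop_zero]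
  have hzlen : (labels.zip t).length = t.length := by simp [List.length_zip]; omega
  have hsnd : (labels.zip t).map Prod.snd = t := List.map_snd_zip (by simpa using hlen)
  have e1 : ((cutsP (labels.zip t)).map (fun c => ((0 + c : Nat) : Int))) ++ [(((h :: t).length : Nat) : Int)]
      = ((cutsP (labels.zip t)) ++ [(labels.zip t).length + 1]).map (fun c => ((c : Nat) : Int)) := by
    simp [hzlen]
  rw [e1]
  have e2 := segsFoldEq (h :: t) ((cutsP (labels.zip t)) ++ [(labels.zip t).length + 1]) 0 0 [] (by simp)
  rw [e2, List.nil_append]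
  have e3 : segB (h :: t) 0 ((cutsP (labels.zip t)) ++ [(labels.zip t).length + 1])
      = segsOf h (labels.zip t) := by
    have := segB_eq_segsOf (labels.zip t) h
    rwa [hsnd] at this
  rw [e3]
  have hne := segsOf_ne_nil h (labels.zip t)
  rw [PySem.List.pyGetD_neg_one _ "" hne, dropTE, List.getLast?_eq_some_getLast hne]
  split_ifs with h1 h2 h3 <;> simp_all

theorem flatMap_groups_eq (labels : List Int) :
    ∀ (probs : List (List String)), (∀ p ∈ probs, p ≠ [] ∧ p.length ≤ labels.length + 1) →
      probs.flatMap (combineGroupA labels) = probs.flatMap (combineGroupB labels) := by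
  intro probs
  induction probs with
  | nil => intro _; rfl
  | cons p ps ih =>
    intro hpre
    obtain ⟨hne, hlen⟩ := hpre p (by simp)
    obtain ⟨h, t, rfl⟩ : ∃ h t, p = h :: t := by
      cases p with | nil => exact absurd rfl hne | cons a b => exact ⟨a, b, rfl⟩
    have hlen' : t.length ≤ labels.length := by simp at hlen; omega
    simp only [List.flatMap_cons]
    rw [groupA_eq labels h t hlen', groupB_eq labels h t hlen',
        ih (fun q hq => hpre q (by simp [hq]))]

-- ===== VERDICT (by name: the statements are the Claim_ definitions above) =====
theorem combine_paragraphs_spec : Claim_equal_combine_paragraphs := by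
  intro probs labels _hdom hpre
  unfold Spec_combine_paragraphs combine_paragraphs combine_paragraphs_alt
  rw [PySem.List.foldl_append_eq_flatMap, PySem.List.foldl_append_eq_flatMap]
  simp only [List.nil_append]
  exact flatMap_groups_eq labels probs hpre
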